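-- pv_equiv track=rewrite | github.com/Jayon28/BOTC_script_generator | generatorv2.py | create_json_with_combinations
-- ===== SOURCE A (Python) =====
-- from itertools import combinations
--
-- def create_json_with_combinations(selected_names, data_dict):
--     filtered_data = []
--     not_found = []
--     jinx = 0
--     for name in selected_names:
--         if name in data_dict:
--             filtered_data.append(data_dict[name])
--         else:
--             not_found.append(name)
--     for combo in combinations(selected_names, 2):
--         combo_name1 = f"{combo[0]}&{combo[1]}"
--         combo_name2 = f"{combo[1]}&{combo[0]}"
--         if combo_name1 in data_dict:
--             filtered_data.append(data_dict[combo_name1])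
--             jinx = 1
--         elif combo_name2 in data_dict:
--             filtered_data.append(data_dict[combo_name2])
--             jinx = 1
--     return filtered_data, not_found, jinx
-- ===== SOURCE B (Python) =====
-- def create_json_with_combinations(selected_names, data_dict):
--     # Index selected names by position, scan only dict keys for jinx pairs,
--     # then sort the matched (i, j, value) triples into combination order.
--     pos = {}
--     for i, name in enumerate(selected_names):
--         pos.setdefault(name, []).append(i)
--     filtered_data = [data_dict[n] for n in selected_names if n in data_dict]
--     not_found = [n for n in selected_names if n not in data_dict]
--     cands = set()
--     for key in data_dict:
--         for p, ch in enumerate(key):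
--             if ch == '&':
--                 a, b = key[:p], key[p + 1:]
--                 if a in pos and b in pos:
--                     cands.add((a, b))
--                     cands.add((b, a))
--     triples = []
--     for a, b in cands:
--         v = data_dict.get(a + "&" + b)
--         if v is None:
--             v = data_dict.get(b + "&" + a)
--         if v is not None:
--             for i in pos[a]:
--                 for j in pos[b]:
--                     if i < j:
--                         triples.append((i, j, v))
--     triples.sort(key=lambda t: (t[0], t[1]))
--     filtered_data.extend(v for _, _, v in triples)
--     return filtered_data, not_found, 1 if triples else 0
-- ===== Notes on version B (the rewrite author's own statement) =====
-- stated objective: faster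
-- what changed: Instead of testing every pair of selected names against the dict (quadratic in the selection), B indexes selected names by position, scans only the dict keys for '&'-joined jinx candidates, expands each matching name pair to its index pairs, and sorts the matched (i,j,value) triples back into combination order.
import Mathlib
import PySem

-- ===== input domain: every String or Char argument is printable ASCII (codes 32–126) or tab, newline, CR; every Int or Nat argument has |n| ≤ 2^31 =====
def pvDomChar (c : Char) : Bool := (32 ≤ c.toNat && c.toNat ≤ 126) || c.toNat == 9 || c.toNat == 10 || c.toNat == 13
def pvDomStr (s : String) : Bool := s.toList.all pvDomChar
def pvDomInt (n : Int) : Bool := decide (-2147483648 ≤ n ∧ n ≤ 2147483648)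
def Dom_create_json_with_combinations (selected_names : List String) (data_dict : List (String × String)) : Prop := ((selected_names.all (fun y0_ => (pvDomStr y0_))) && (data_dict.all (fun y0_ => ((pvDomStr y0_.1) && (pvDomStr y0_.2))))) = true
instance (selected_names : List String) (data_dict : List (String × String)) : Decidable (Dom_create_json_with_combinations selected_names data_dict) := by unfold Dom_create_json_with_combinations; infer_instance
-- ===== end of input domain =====

-- B replaces A's quadratic scan over all pairs of selected names by indexing the
-- selected names by position, scanning only the dict keys for '&'-joined candidate
-- pairs, and sorting the matched (i, j, value) triples back into combination order.

-- ===== PORT A =====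

-- itertools.combinations(xs, 2), with each 2-element combination as a pair (exact:
-- CPython yields the tuples (xs[i], xs[j]) for i < j in index-lexicographic order).
def cjwcCombos2 {α : Type} : List α → List (α × α)
  | [] => []
  | x :: rest => rest.map (fun y => (x, y)) ++ cjwcCombos2 rest

def create_json_with_combinations (selected_names : List String) (data_dict : List (String × String)) : List String × List String × Int :=
  let d := PySem.Dict.mk data_dict
  -- first loop: the names themselves
  let fn := selected_names.foldl (fun (acc : List String × List String) name =>
      match d.get? name with
      | some v => (acc.1 ++ [v], acc.2)
      | none   => (acc.1, acc.2 ++ [name])) ([], [])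
  -- second loop: combinations of two selected names
  let fj := (cjwcCombos2 selected_names).foldl (fun (acc : List String × Int) combo =>
      match d.get? (combo.1 ++ "&" ++ combo.2) with
      | some v => (acc.1 ++ [v], 1)
      | none =>
        match d.get? (combo.2 ++ "&" ++ combo.1) with
        | some v => (acc.1 ++ [v], 1)
        | none => acc) (fn.1, 0)
  (fj.1, fn.2, fj.2)

-- ===== PORT B =====

def create_json_with_combinations_alt (selected_names : List String) (data_dict : List (String × String)) : List String × List String × Int :=
  let d := PySem.Dict.mk data_dict
  -- pos: name -> list of its positions (pos.setdefault(name, []).append(i))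
  let pos : PySem.Dict String (List Int) :=
    (PySem.List.enumerate selected_names 0).foldl
      (fun pos p => pos.modify p.2 [] (fun l => l ++ [p.1])) PySem.Dict.empty
  -- [data_dict[n] for n in selected_names if n in data_dict] (guarded index = get?)
  let filtered_data := selected_names.filterMap (fun n => d.get? n)
  let not_found := selected_names.filter (fun n => !(d.contains n))
  -- candidate ordered name pairs harvested from the dict keys
  -- (key[:p] / key[p+1:] ported as list slices of the characters; p ≥ 0 here, exact)
  let cands : PySem.Set (String × String) :=
    data_dict.foldl (fun s kv =>
      (PySem.List.enumerate kv.1.toList 0).foldl (fun s pc =>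
        if pc.2 = '&' then
          let a := String.ofList (PySem.List.slice kv.1.toList none (some pc.1))
          let b := String.ofList (PySem.List.slice kv.1.toList (some (pc.1 + 1)) none)
          if pos.contains a && pos.contains b then
            PySem.Set.add (PySem.Set.add s (a, b)) (b, a)
          else s
        else s) s) (PySem.Set.ofList [])
  let triples : List (Int × Int × String) :=
    cands.foldl (fun tr ab =>
      let v? := match d.get? (ab.1 ++ "&" ++ ab.2) with
                | some v => some v
                | none => d.get? (ab.2 ++ "&" ++ ab.1)
      match v? with
      | some v =>
          (pos.getD ab.1 []).foldl (fun tr i =>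
            (pos.getD ab.2 []).foldl (fun tr j =>
              if i < j then tr ++ [(i, j, v)] else tr) tr) tr
      | none => tr) []
  let sortedT := PySem.List.sorted2 triples (fun t => t.1) (fun t => t.2.1)
  (filtered_data ++ sortedT.map (fun t => t.2.2), not_found,
   if triples.isEmpty then 0 else 1)

-- ===== PRECONDITION & SPEC =====
def Spec_create_json_with_combinations (selected_names : List String) (data_dict : List (String × String)) (out : List String × List String × Int) : Prop := out = create_json_with_combinations_alt selected_names data_dict
instance (selected_names : List String) (data_dict : List (String × String)) (out : List String × List String × Int) : Decidable (Spec_create_json_with_combinations selected_names data_dict out) := by unfold Spec_create_json_with_combinations; infer_instance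

-- ===== CLAIM (what is proved, stated in full; the proofs are below) =====
def Claim_equal_create_json_with_combinations : Prop := ∀ (selected_names : List String) (data_dict : List (String × String)), Dom_create_json_with_combinations selected_names data_dict → Spec_create_json_with_combinations selected_names data_dict (create_json_with_combinations selected_names data_dict)

-- ===== LEMMAS AND PROOFS =====

-- Names of proof-side objects: pvVal (the value the elif chain picks for an ordered
-- name pair), pvPos/pvPosL (B's position index), pvCands (B's candidate set),
-- pvTriples (B's unsorted triple list), pvYs (the triples in combination order).

def pvVal (d : PySem.Dict String String) (a b : String) : Option String :=
  match d.get? (a ++ "&" ++ b) with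
  | some v => some v
  | none => d.get? (b ++ "&" ++ a)

def pvPos (sel : List String) : PySem.Dict String (List Int) :=
  (PySem.List.enumerate sel 0).foldl
    (fun pos p => pos.modify p.2 [] (fun l => l ++ [p.1])) PySem.Dict.empty

def pvPosL (sel : List String) (a : String) : List Int := (pvPos sel).getD a []

def pvSplitA (k : String) (p : Int) : String := String.ofList (PySem.List.slice k.toList none (some p))
def pvSplitB (k : String) (p : Int) : String := String.ofList (PySem.List.slice k.toList (some (p + 1)) none)

def pvIStep (sel : List String) (k : String) (s : PySem.Set (String × String)) (pc : Int × Char) : PySem.Set (String × String) :=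
  if pc.2 = '&' then
    if (pvPos sel).contains (pvSplitA k pc.1) && (pvPos sel).contains (pvSplitB k pc.1) then
      PySem.Set.add (PySem.Set.add s (pvSplitA k pc.1, pvSplitB k pc.1)) (pvSplitB k pc.1, pvSplitA k pc.1)
    else s
  else s

def pvOStep (sel : List String) (s : PySem.Set (String × String)) (kv : String × String) : PySem.Set (String × String) :=
  (PySem.List.enumerate kv.1.toList 0).foldl (pvIStep sel kv.1) s

def pvCands (sel : List String) (dd : List (String × String)) : PySem.Set (String × String) :=
  dd.foldl (pvOStep sel) (PySem.Set.ofList [])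

def pvCStep (sel : List String) (dd : List (String × String)) (tr : List (Int × Int × String)) (ab : String × String) : List (Int × Int × String) :=
  match pvVal (PySem.Dict.mk dd) ab.1 ab.2 with
  | some v =>
      (pvPosL sel ab.1).foldl (fun tr i =>
        (pvPosL sel ab.2).foldl (fun tr j =>
          if i < j then tr ++ [(i, j, v)] else tr) tr) tr
  | none => tr

def pvTriples (sel : List String) (dd : List (String × String)) : List (Int × Int × String) :=
  (pvCands sel dd).foldl (pvCStep sel dd) []

def pvH (sel : List String) (dd : List (String × String)) (ab : String × String) : List (Int × Int × String) :=
  match pvVal (PySem.Dict.mk dd) ab.1 ab.2 with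
  | some v => (pvPosL sel ab.1).flatMap (fun i =>
      ((pvPosL sel ab.2).filter (fun j => decide (i < j))).map (fun j => (i, j, v)))
  | none => []

def pvYs (sel : List String) (dd : List (String × String)) : List (Int × Int × String) :=
  (cjwcCombos2 (PySem.List.enumerate sel 0)).filterMap
    (fun p => (pvVal (PySem.Dict.mk dd) p.1.2 p.2.2).map (fun v => (p.1.1, p.2.1, v)))

def pvOuts (sel : List String) (dd : List (String × String)) : List String :=
  (cjwcCombos2 sel).filterMap (fun c => pvVal (PySem.Dict.mk dd) c.1 c.2)

def pvKey (t : Int × Int × String) : Int × Int := (t.1, t.2.1)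

def pvLex (x y : Int × Int × String) : Prop := x.1 < y.1 ∨ (x.1 = y.1 ∧ x.2.1 < y.2.1)

def pvBefore (x y : Int × Int × String) : Bool :=
  decide (x.1 < y.1) || (!decide (y.1 < x.1) && decide (x.2.1 < y.2.1))

-- ---- port characterizations ----

lemma pvAlt_eq (sel : List String) (dd : List (String × String)) :
    create_json_with_combinations_alt sel dd =
      (sel.filterMap (fun n => (PySem.Dict.mk dd).get? n)
         ++ (PySem.List.sorted2 (pvTriples sel dd) (fun t => t.1) (fun t => t.2.1)).map (fun t => t.2.2),
       sel.filter (fun n => !((PySem.Dict.mk dd).contains n)),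
       if (pvTriples sel dd).isEmpty then 0 else 1) := rfl

lemma pvLoopA1 (d : PySem.Dict String String) (l : List String) : ∀ (acc1 acc2 : List String),
    l.foldl (fun (acc : List String × List String) name =>
      match d.get? name with
      | some v => (acc.1 ++ [v], acc.2)
      | none   => (acc.1, acc.2 ++ [name])) (acc1, acc2)
    = (acc1 ++ l.filterMap (fun n => d.get? n), acc2 ++ l.filter (fun n => !(d.contains n))) := by
  induction l with
  | nil => simp
  | cons x xs ih =>
    intro acc1 acc2
    cases h : d.get? x with
    | some v =>
      simp [h, ih, PySem.Dict.contains_eq_isSome_get?]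
    | none =>
      simp [h, ih, PySem.Dict.contains_eq_isSome_get?]

lemma pvLoopA2 (d : PySem.Dict String String) (l : List (String × String)) : ∀ (acc : List String) (jx : Int),
    l.foldl (fun (acc : List String × Int) combo =>
      match d.get? (combo.1 ++ "&" ++ combo.2) with
      | some v => (acc.1 ++ [v], 1)
      | none =>
        match d.get? (combo.2 ++ "&" ++ combo.1) with
        | some v => (acc.1 ++ [v], 1)
        | none => acc) (acc, jx)
    = (acc ++ l.filterMap (fun c => pvVal d c.1 c.2),
       if l.filterMap (fun c => pvVal d c.1 c.2) = [] then jx else 1) := by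
  induction l with
  | nil => simp
  | cons c cs ih =>
    intro acc jx
    cases h1 : d.get? (c.1 ++ "&" ++ c.2) with
    | some v =>
      have hv : pvVal d c.1 c.2 = some v := by simp [pvVal, h1]
      simp [h1, ih, hv]
    | none =>
      cases h2 : d.get? (c.2 ++ "&" ++ c.1) with
      | some v =>
        have hv : pvVal d c.1 c.2 = some v := by simp [pvVal, h1, h2]
        simp [h1, h2, ih, hv]
      | none =>
        have hv : pvVal d c.1 c.2 = none := by simp [pvVal, h1, h2]
        simp [h1, h2, ih, List.filterMap_cons, hv]
        refine if_congr ?_ rfl rfl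
        rw [hv]

lemma pvA_eq (sel : List String) (dd : List (String × String)) :
    create_json_with_combinations sel dd =
      (sel.filterMap (fun n => (PySem.Dict.mk dd).get? n) ++ pvOuts sel dd,
       sel.filter (fun n => !((PySem.Dict.mk dd).contains n)),
       if pvOuts sel dd = [] then 0 else 1) := by
  show (let d := PySem.Dict.mk dd
        let fn := sel.foldl (fun (acc : List String × List String) name =>
            match d.get? name with
            | some v => (acc.1 ++ [v], acc.2)
            | none   => (acc.1, acc.2 ++ [name])) ([], [])
        let fj := (cjwcCombos2 sel).foldl (fun (acc : List String × Int) combo =>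
            match d.get? (combo.1 ++ "&" ++ combo.2) with
            | some v => (acc.1 ++ [v], 1)
            | none =>
              match d.get? (combo.2 ++ "&" ++ combo.1) with
              | some v => (acc.1 ++ [v], 1)
              | none => acc) (fn.1, 0)
        (fj.1, fn.2, fj.2)) = _
  simp only [pvLoopA1 (PySem.Dict.mk dd) sel [] [], pvLoopA2 (PySem.Dict.mk dd) (cjwcCombos2 sel)]
  simp [pvOuts]

-- ---- combinations-of-two lemmas ----

lemma mem_cjwcCombos2 {α : Type} (l : List α) (p : α × α) :
    p ∈ cjwcCombos2 l ↔ ∃ (i j : Nat) (hi : i < l.length) (hj : j < l.length),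
      i < j ∧ p = (l[i], l[j]) := by
  induction l with
  | nil => simp [cjwcCombos2]
  | cons x xs ih =>
    simp only [cjwcCombos2, List.mem_append, List.mem_map, ih]
    constructor
    · rintro (⟨y, hy, rfl⟩ | ⟨i, j, hi, hj, hij, rfl⟩)
      · obtain ⟨k, hk, rfl⟩ := List.mem_iff_getElem.mp hy
        refine ⟨0, k + 1, by simp, by simp only [List.length_cons]; omega, by omega, ?_⟩
        simp
      · refine ⟨i + 1, j + 1, by simp only [List.length_cons]; omega,
          by simp only [List.length_cons]; omega, by omega, ?_⟩
        simp
    · rintro ⟨i, j, hi, hj, hij, rfl⟩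
      match i, j, hij with
      | i, 0, h => exact absurd h (Nat.not_lt_zero i)
      | 0, j + 1, _ =>
        refine Or.inl ⟨xs[j]'(by simp only [List.length_cons] at hj; omega),
          List.getElem_mem _, ?_⟩
        simp
      | i + 1, j + 1, h =>
        refine Or.inr ⟨i, j, by simp only [List.length_cons] at hi; omega,
          by simp only [List.length_cons] at hj; omega, by omega, ?_⟩
        simp

lemma fst_mem_of_mem_cjwcCombos2 {α : Type} {l : List α} {p : α × α}
    (h : p ∈ cjwcCombos2 l) : p.1 ∈ l := by
  obtain ⟨i, j, hi, hj, _, rfl⟩ := (mem_cjwcCombos2 l p).mp h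
  exact List.getElem_mem _

lemma cjwcCombos2_map {α β : Type} (f : α → β) (l : List α) :
    cjwcCombos2 (l.map f) = (cjwcCombos2 l).map (fun p => (f p.1, f p.2)) := by
  induction l with
  | nil => rfl
  | cons x xs ih => simp [cjwcCombos2, ih, List.map_map, Function.comp_def]

lemma cjwcCombos2_pairwise {α : Type} (R : α → α → Prop) (l : List α) (h : l.Pairwise R) :
    (cjwcCombos2 l).Pairwise (fun p q => R p.1 q.1 ∨ (p.1 = q.1 ∧ R p.2 q.2)) := by
  induction h with
  | nil => exact List.Pairwise.nil
  | @cons x xs hx _ ih =>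
    show ((xs.map (fun y => (x, y)) ++ cjwcCombos2 xs).Pairwise _)
    rw [List.pairwise_append]
    refine ⟨?_, ih, ?_⟩
    · rw [List.pairwise_map]
      exact ‹xs.Pairwise R›.imp (fun hr => Or.inr ⟨rfl, hr⟩)
    · intro a ha b hb
      obtain ⟨y, _, rfl⟩ := List.mem_map.mp ha
      exact Or.inl (hx _ (fst_mem_of_mem_cjwcCombos2 hb))

-- ---- position-index lemmas ----

lemma pvPos_keys (sel : List String) : (pvPos sel).keys = PySem.Set.ofList sel := by
  have h := PySem.Dict.keys_foldl_modify_key (PySem.List.enumerate sel 0)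
    (fun (p : Int × String) => p.2) ([] : List Int)
    (fun _ p => (fun l => l ++ [p.1])) PySem.Dict.empty
  calc (pvPos sel).keys
      = PySem.Set.update PySem.Dict.empty.keys
          ((PySem.List.enumerate sel 0).map (fun p => p.2)) := h
    _ = PySem.Set.ofList sel := by
        rw [PySem.List.map_snd_enumerate]
        exact PySem.Set.update_nil_left sel

lemma pvPos_contains (sel : List String) (a : String) :
    (pvPos sel).contains a = true ↔ a ∈ sel := by
  rw [PySem.Dict.contains_iff_mem_keys, pvPos_keys, PySem.Set.mem_ofList]

lemma pvPosL_eq (sel : List String) (a : String) :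
    pvPosL sel a
      = (((PySem.List.enumerate sel 0).map Prod.swap).filter (fun q => q.1 == a)).map (fun q => q.2) := by
  have h2 : ((PySem.List.enumerate sel 0).map Prod.swap).foldl
      (fun d p => d.modify p.1 [] (fun l => l ++ [p.2])) PySem.Dict.empty = pvPos sel := by
    rw [List.foldl_map]
    rfl
  have h := PySem.Dict.getD_foldl_modify_append
    ((PySem.List.enumerate sel 0).map Prod.swap) PySem.Dict.empty a
  rw [h2] at h
  unfold pvPosL
  rw [h, PySem.Dict.getD_empty, List.nil_append]

lemma mem_pvPosL (sel : List String) (a : String) (i : Int) :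
    i ∈ pvPosL sel a ↔ ∃ (k : Nat) (hk : k < sel.length), i = (k : Int) ∧ sel[k] = a := by
  rw [pvPosL_eq]
  simp only [List.mem_map, List.mem_filter, PySem.List.mem_enumerate_iff, beq_iff_eq]
  constructor
  · rintro ⟨q, ⟨⟨p, ⟨k, hk, rfl⟩, rfl⟩, hqa⟩, rfl⟩
    exact ⟨k, hk, by simp, by simpa using hqa⟩
  · rintro ⟨k, hk, rfl, rfl⟩
    exact ⟨(sel[k], (k : Int)), ⟨⟨((k : Int), sel[k]), ⟨k, hk, by simp⟩, rfl⟩, rfl⟩, rfl⟩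

lemma pairwise_lt_pvPosL (sel : List String) (a : String) :
    (pvPosL sel a).Pairwise (· < ·) := by
  rw [pvPosL_eq]
  rw [List.pairwise_map]
  apply List.Pairwise.filter
  rw [List.pairwise_map]
  exact (PySem.List.pairwise_lt_enumerate sel 0).imp (fun h => h)

-- ---- candidate-set lemmas ----

lemma pvFoldlMemPres {γ T : Type} (step : List T → γ → List T)
    (hstep : ∀ s c x, x ∈ s → x ∈ step s c) :
    ∀ (l : List γ) (s : List T) (x : T), x ∈ s → x ∈ l.foldl step s := by
  intro l
  induction l with
  | nil => intro s x h; simpa using h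
  | cons c cs ih =>
    intro s x h
    rw [List.foldl_cons]
    exact ih _ _ (hstep _ _ _ h)

lemma pvFoldlMemIntro {γ T : Type} (step : List T → γ → List T)
    (hstep : ∀ s c x, x ∈ s → x ∈ step s c) {l : List γ} {c0 : γ} (hc0 : c0 ∈ l)
    {x : T} (hin : ∀ s, x ∈ step s c0) : ∀ (s : List T), x ∈ l.foldl step s := by
  induction l with
  | nil => cases hc0
  | cons c cs ih =>
    intro s
    rw [List.foldl_cons]
    rcases List.mem_cons.mp hc0 with rfl | h
    · exact pvFoldlMemPres step hstep cs _ x (hin s)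
    · exact ih h _

lemma pvIStep_pres (sel : List String) (k : String) :
    ∀ s pc x, x ∈ s → x ∈ pvIStep sel k s pc := by
  intro s pc x hx
  unfold pvIStep
  split_ifs with h1 h2
  · exact (PySem.Set.mem_add _ _ _).mpr (Or.inl ((PySem.Set.mem_add _ _ _).mpr (Or.inl hx)))
  · exact hx
  · exact hx

lemma pvOStep_pres (sel : List String) :
    ∀ s kv x, x ∈ s → x ∈ pvOStep sel s kv := by
  intro s kv x hx
  exact pvFoldlMemPres (pvIStep sel kv.1) (pvIStep_pres sel kv.1) _ _ _ hx

lemma pvStr_toList_amp (a b : String) :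
    (a ++ "&" ++ b).toList = a.toList ++ '&' :: b.toList := by
  simp [String.toList_append]

lemma pvFoldlNodup {γ T : Type} (step : List T → γ → List T)
    (hstep : ∀ s c, s.Nodup → (step s c).Nodup) :
    ∀ (l : List γ) (s : List T), s.Nodup → (l.foldl step s).Nodup := by
  intro l
  induction l with
  | nil => intro s h; simpa using h
  | cons c cs ih =>
    intro s h
    rw [List.foldl_cons]
    exact ih _ (hstep _ _ h)

lemma nodup_pvCands (sel : List String) (dd : List (String × String)) :
    (pvCands sel dd).Nodup := by
  apply pvFoldlNodup (pvOStep sel)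
  · intro s kv hs
    apply pvFoldlNodup (pvIStep sel kv.1)
    · intro s' pc hs'
      unfold pvIStep
      split_ifs with h1 h2
      · exact PySem.Set.nodup_add _ _ (PySem.Set.nodup_add _ _ hs')
      · exact hs'
      · exact hs'
    · exact hs
  · exact List.nodup_nil

lemma pvCands_mem (sel : List String) (dd : List (String × String)) {a b v : String}
    (ha : a ∈ sel) (hb : b ∈ sel) (hk : (a ++ "&" ++ b, v) ∈ dd) :
    (a, b) ∈ pvCands sel dd ∧ (b, a) ∈ pvCands sel dd := by
  have hlen : (a ++ "&" ++ b).toList = a.toList ++ '&' :: b.toList := pvStr_toList_amp a b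
  -- the split position and split results
  have hpc : ((a.toList.length : Int), '&') ∈ PySem.List.enumerate (a ++ "&" ++ b).toList 0 := by
    rw [PySem.List.mem_enumerate_iff]
    refine ⟨a.toList.length, ?_, ?_⟩
    · rw [hlen, List.length_append]; simp
    · have : (a ++ "&" ++ b).toList[a.toList.length]'(by rw [hlen, List.length_append]; simp) = '&' := by
        rw [List.getElem_of_eq hlen]
        rw [List.getElem_append_right (le_refl _)]
        simp
      simp
  have hsliceA : pvSplitA (a ++ "&" ++ b) (a.toList.length : Int) = a := by
    unfold pvSplitA
    rw [PySem.List.slice_to_natCast, hlen, List.take_left]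
    simp
  have hsliceB : pvSplitB (a ++ "&" ++ b) (a.toList.length : Int) = b := by
    unfold pvSplitB
    have : ((a.toList.length : Int) + 1) = ((a.toList.length + 1 : Nat) : Int) := by push_cast; ring
    rw [this, PySem.List.slice_from_natCast, hlen]
    rw [show a.toList ++ '&' :: b.toList = (a.toList ++ ['&']) ++ b.toList by simp]
    rw [List.drop_left' (by simp)]
    simp
  have hguard : ((pvPos sel).contains a && (pvPos sel).contains b) = true := by
    rw [Bool.and_eq_true]
    exact ⟨(pvPos_contains sel a).mpr ha, (pvPos_contains sel b).mpr hb⟩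
  have hin : ∀ s, (a, b) ∈ pvIStep sel (a ++ "&" ++ b) s ((a.toList.length : Int), '&')
             ∧ (b, a) ∈ pvIStep sel (a ++ "&" ++ b) s ((a.toList.length : Int), '&') := by
    intro s
    unfold pvIStep
    rw [if_pos rfl, hsliceA, hsliceB, if_pos hguard]
    constructor
    · exact (PySem.Set.mem_add _ _ _).mpr (Or.inl ((PySem.Set.mem_add _ _ _).mpr (Or.inr rfl)))
    · exact (PySem.Set.mem_add _ _ _).mpr (Or.inr rfl)
  have houter : ∀ s, (a, b) ∈ pvOStep sel s (a ++ "&" ++ b, v)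
              ∧ (b, a) ∈ pvOStep sel s (a ++ "&" ++ b, v) := by
    intro s
    constructor
    · exact pvFoldlMemIntro (pvIStep sel (a ++ "&" ++ b)) (pvIStep_pres sel _) hpc
        (fun s' => (hin s').1) s
    · exact pvFoldlMemIntro (pvIStep sel (a ++ "&" ++ b)) (pvIStep_pres sel _) hpc
        (fun s' => (hin s').2) s
  constructor
  · exact pvFoldlMemIntro (pvOStep sel) (pvOStep_pres sel) hk (fun s => (houter s).1) _
  · exact pvFoldlMemIntro (pvOStep sel) (pvOStep_pres sel) hk (fun s => (houter s).2) _

-- ---- triples lemmas ----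

lemma pvInnerFold (i : Int) (v : String) (l : List Int) : ∀ (tr : List (Int × Int × String)),
    l.foldl (fun tr j => if i < j then tr ++ [(i, j, v)] else tr) tr
    = tr ++ (l.filter (fun j => decide (i < j))).map (fun j => (i, j, v)) := by
  induction l with
  | nil => simp
  | cons j js ih =>
    intro tr
    by_cases h : i < j <;> simp [h, ih]

lemma pvCStep_eq (sel : List String) (dd : List (String × String)) (tr : List (Int × Int × String))
    (ab : String × String) : pvCStep sel dd tr ab = tr ++ pvH sel dd ab := by
  unfold pvCStep pvH
  cases hv : pvVal (PySem.Dict.mk dd) ab.1 ab.2 with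
  | none => simp
  | some v =>
    simp only [pvInnerFold]
    exact PySem.List.foldl_append_eq_flatMap _ _ tr

lemma pvTriples_eq (sel : List String) (dd : List (String × String)) :
    pvTriples sel dd = (pvCands sel dd).flatMap (pvH sel dd) := by
  unfold pvTriples
  have hf : pvCStep sel dd = (fun tr ab => tr ++ pvH sel dd ab) :=
    funext fun tr => funext fun ab => pvCStep_eq sel dd tr ab
  rw [hf, PySem.List.foldl_append_eq_flatMap, List.nil_append]

lemma mem_pvH (sel : List String) (dd : List (String × String)) (ab : String × String)
    (t : Int × Int × String) :
    t ∈ pvH sel dd ab ↔ pvVal (PySem.Dict.mk dd) ab.1 ab.2 = some t.2.2 ∧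
      t.1 ∈ pvPosL sel ab.1 ∧ t.2.1 ∈ pvPosL sel ab.2 ∧ t.1 < t.2.1 := by
  obtain ⟨ti, tj, tv⟩ := t
  unfold pvH
  cases hv : pvVal (PySem.Dict.mk dd) ab.1 ab.2 with
  | none => simp
  | some v =>
    simp only [List.mem_flatMap, List.mem_map, List.mem_filter, decide_eq_true_eq,
      Prod.mk.injEq, Option.some.injEq]
    constructor
    · rintro ⟨i, hi, j, ⟨hj, hij⟩, rfl, rfl, rfl⟩
      exact ⟨rfl, hi, hj, hij⟩
    · rintro ⟨rfl, hi, hj, hij⟩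
      exact ⟨ti, hi, tj, ⟨hj, hij⟩, rfl, rfl, rfl⟩

lemma mem_pvYs (sel : List String) (dd : List (String × String)) (t : Int × Int × String) :
    t ∈ pvYs sel dd ↔ ∃ (k1 k2 : Nat) (h1 : k1 < sel.length) (h2 : k2 < sel.length),
      k1 < k2 ∧ pvVal (PySem.Dict.mk dd) sel[k1] sel[k2] = some t.2.2 ∧
      t.1 = (k1 : Int) ∧ t.2.1 = (k2 : Int) := by
  obtain ⟨ti, tj, tv⟩ := t
  unfold pvYs
  simp only [List.mem_filterMap, mem_cjwcCombos2, PySem.List.length_enumerate,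
    PySem.List.getElem_enumerate, Option.map_eq_some_iff, Prod.mk.injEq, zero_add]
  constructor
  · rintro ⟨p, ⟨k1, k2, h1, h2, hk, rfl⟩, v, hv, h3, h4, h5⟩
    exact ⟨k1, k2, h1, h2, hk, by rw [hv, h5], h3.symm, h4.symm⟩
  · rintro ⟨k1, k2, h1, h2, hk, hv, rfl, rfl⟩
    exact ⟨(((k1 : Int), sel[k1]), ((k2 : Int), sel[k2])),
      ⟨k1, k2, h1, h2, hk, rfl⟩, tv, hv, rfl, rfl, rfl⟩

lemma mem_pvTriples_iff (sel : List String) (dd : List (String × String)) (t : Int × Int × String) :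
    t ∈ pvTriples sel dd ↔ t ∈ pvYs sel dd := by
  rw [pvTriples_eq, List.mem_flatMap, mem_pvYs]
  constructor
  · rintro ⟨ab, _, ht⟩
    rw [mem_pvH] at ht
    obtain ⟨hv, hi, hj, hlt⟩ := ht
    rw [mem_pvPosL] at hi hj
    obtain ⟨k1, h1, hik, hsk1⟩ := hi
    obtain ⟨k2, h2, hjk, hsk2⟩ := hj
    refine ⟨k1, k2, h1, h2, ?_, ?_, hik, hjk⟩
    · rw [hik, hjk] at hlt; exact_mod_cast hlt
    · rw [hsk1, hsk2]; exact hv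
  · rintro ⟨k1, k2, h1, h2, hk, hv, hti, htj⟩
    refine ⟨(sel[k1], sel[k2]), ?_, ?_⟩
    · unfold pvVal at hv
      cases hg : (PySem.Dict.mk dd).get? (sel[k1] ++ "&" ++ sel[k2]) with
      | some w =>
        exact (pvCands_mem sel dd (List.getElem_mem _) (List.getElem_mem _)
          (PySem.Dict.mem_items_of_get?_eq_some _ hg)).1
      | none =>
        rw [hg] at hv
        exact (pvCands_mem sel dd (List.getElem_mem _) (List.getElem_mem _)
          (PySem.Dict.mem_items_of_get?_eq_some _ hv)).2
    · rw [mem_pvH]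
      refine ⟨hv, ?_, ?_, ?_⟩
      · exact (mem_pvPosL sel _ _).mpr ⟨k1, h1, hti, rfl⟩
      · exact (mem_pvPosL sel _ _).mpr ⟨k2, h2, htj, rfl⟩
      · rw [hti, htj]; exact_mod_cast hk

-- a triple in pvH ab determines the candidate ab
lemma pvH_det (sel : List String) (dd : List (String × String)) {ab : String × String}
    {t : Int × Int × String} (ht : t ∈ pvH sel dd ab) :
    ∃ (k1 k2 : Nat) (h1 : k1 < sel.length) (h2 : k2 < sel.length),
      t.1 = (k1 : Int) ∧ t.2.1 = (k2 : Int) ∧ ab = (sel[k1], sel[k2]) := by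
  rw [mem_pvH] at ht
  obtain ⟨_, hi, hj, _⟩ := ht
  rw [mem_pvPosL] at hi hj
  obtain ⟨k1, h1, hik, hsk1⟩ := hi
  obtain ⟨k2, h2, hjk, hsk2⟩ := hj
  exact ⟨k1, k2, h1, h2, hik, hjk, Prod.ext hsk1.symm hsk2.symm⟩

lemma pairwise_keyne_pvTriples (sel : List String) (dd : List (String × String)) :
    (pvTriples sel dd).Pairwise (fun x y => pvKey x ≠ pvKey y) := by
  rw [pvTriples_eq, List.pairwise_flatMap]
  constructor
  · intro ab _
    unfold pvH
    cases hv : pvVal (PySem.Dict.mk dd) ab.1 ab.2 with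
    | none => exact List.Pairwise.nil
    | some v =>
      rw [List.pairwise_flatMap]
      constructor
      · intro i _
        rw [List.pairwise_map]
        refine List.Pairwise.imp ?_ (List.Pairwise.filter _ (pairwise_lt_pvPosL sel ab.2))
        intro j j' hjj' hk
        have h2 : j = j' := congrArg (fun q => q.2) hk
        omega
      · refine List.Pairwise.imp ?_ (pairwise_lt_pvPosL sel ab.1)
        intro i i' hii' x hx y hy
        simp only [List.mem_map, List.mem_filter] at hx hy
        obtain ⟨j, _, rfl⟩ := hx
        obtain ⟨j', _, rfl⟩ := hy
        intro hk
        have h2 : i = i' := congrArg (fun q => q.1) hk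
        omega
  · refine List.Pairwise.imp ?_ (nodup_pvCands sel dd)
    intro ab ab' hne x hx y hy hkey
    apply hne
    obtain ⟨k1, k2, h1, h2, hx1, hx2, rfl⟩ := pvH_det sel dd hx
    obtain ⟨k1', k2', h1', h2', hy1, hy2, rfl⟩ := pvH_det sel dd hy
    have e0 : x.1 = y.1 := congrArg (fun q => q.1) hkey
    have e0' : x.2.1 = y.2.1 := congrArg (fun q => q.2) hkey
    have e1 : (k1 : Int) = (k1' : Int) := by rw [← hx1, ← hy1]; exact e0
    have e2 : (k2 : Int) = (k2' : Int) := by rw [← hx2, ← hy2]; exact e0'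
    have e1' : k1 = k1' := by exact_mod_cast e1
    have e2' : k2 = k2' := by exact_mod_cast e2
    subst e1'; subst e2'
    rfl

lemma pairwise_lex_pvYs (sel : List String) (dd : List (String × String)) :
    (pvYs sel dd).Pairwise pvLex := by
  unfold pvYs
  rw [List.pairwise_filterMap]
  have h := cjwcCombos2_pairwise (fun (p q : Int × String) => p.1 < q.1)
    (PySem.List.enumerate sel 0) (PySem.List.pairwise_lt_enumerate sel 0)
  refine h.imp ?_
  intro p q hr b hb b' hb'
  simp only [Option.map_eq_some_iff] at hb hb'
  obtain ⟨v, _, rfl⟩ := hb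
  obtain ⟨v', _, rfl⟩ := hb'
  rcases hr with h1 | ⟨h1, h2⟩
  · exact Or.inl h1
  · exact Or.inr ⟨by rw [h1], h2⟩

lemma pvLex_ne {x y : Int × Int × String} (h : pvLex x y) : x ≠ y := by
  rintro rfl
  unfold pvLex at h
  omega

lemma perm_pvTriples_pvYs (sel : List String) (dd : List (String × String)) :
    (pvTriples sel dd).Perm (pvYs sel dd) := by
  have nd1 : (pvTriples sel dd).Nodup :=
    (pairwise_keyne_pvTriples sel dd).imp (fun h heq => h (congrArg pvKey heq))
  have nd2 : (pvYs sel dd).Nodup :=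
    (pairwise_lex_pvYs sel dd).imp (fun h => pvLex_ne h)
  exact (List.perm_ext_iff_of_nodup nd1 nd2).mpr (mem_pvTriples_iff sel dd)

-- ---- sortedness of sorted2 for this key pair ----

lemma pvBefore_iff (x y : Int × Int × String) :
    pvBefore x y = true ↔ (x.1 < y.1 ∨ (x.1 = y.1 ∧ x.2.1 < y.2.1)) := by
  unfold pvBefore
  simp only [Bool.or_eq_true, Bool.and_eq_true, Bool.not_eq_true', decide_eq_true_eq,
    decide_eq_false_iff_not]
  omega

lemma pvBefore_false_iff (x y : Int × Int × String) :
    pvBefore y x = false ↔ (x.1 < y.1 ∨ (x.1 = y.1 ∧ x.2.1 ≤ y.2.1)) := by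
  rw [← Bool.not_eq_true, pvBefore_iff]
  constructor
  · intro h; omega
  · intro h; omega

lemma pvInsertBy_pairwise (x : Int × Int × String) (ys : List (Int × Int × String))
    (h : ys.Pairwise (fun a b => pvBefore b a = false)) :
    (PySem.List.insertBy pvBefore x ys).Pairwise (fun a b => pvBefore b a = false) := by
  induction ys with
  | nil => simp [PySem.List.insertBy]
  | cons y ys ih =>
    rw [List.pairwise_cons] at h
    obtain ⟨hy, hys⟩ := h
    show (if pvBefore x y = true then x :: y :: ys else y :: PySem.List.insertBy pvBefore x ys).Pairwise _
    by_cases hb : pvBefore x y = true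
    · rw [if_pos hb]
      rw [pvBefore_iff] at hb
      refine List.Pairwise.cons ?_ (List.Pairwise.cons hy hys)
      intro z hz
      rcases List.mem_cons.mp hz with rfl | hz'
      · rw [pvBefore_false_iff]; omega
      · have := hy z hz'
        rw [pvBefore_false_iff] at this ⊢
        omega
    · rw [if_neg hb]
      refine List.Pairwise.cons ?_ (ih hys)
      intro z hz
      rcases (PySem.List.mem_insertBy pvBefore x z ys).mp hz with rfl | hz'
      · rw [Bool.not_eq_true] at hb
        rw [pvBefore_false_iff]
        rw [← Bool.not_eq_true, pvBefore_iff] at hb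
        omega
      · exact hy z hz'

lemma pvFoldInsert_pairwise (l : List (Int × Int × String)) :
    ∀ (acc : List (Int × Int × String)), acc.Pairwise (fun a b => pvBefore b a = false) →
    (l.foldl (fun acc x => PySem.List.insertBy pvBefore x acc) acc).Pairwise
      (fun a b => pvBefore b a = false) := by
  induction l with
  | nil => intro acc h; simpa using h
  | cons x xs ih => intro acc h; exact ih _ (pvInsertBy_pairwise x acc h)

lemma pvSorted2_pairwise (l : List (Int × Int × String)) :
    (PySem.List.sorted2 l (fun t => t.1) (fun t => t.2.1)).Pairwise
      (fun a b => pvBefore b a = false) := by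
  show (l.foldl (fun acc x => PySem.List.insertBy pvBefore x acc) []).Pairwise _
  exact pvFoldInsert_pairwise l [] List.Pairwise.nil

lemma pvSorted2_eq (sel : List String) (dd : List (String × String)) :
    PySem.List.sorted2 (pvTriples sel dd) (fun t => t.1) (fun t => t.2.1) = pvYs sel dd := by
  have hperm : (PySem.List.sorted2 (pvTriples sel dd) (fun t => t.1) (fun t => t.2.1)).Perm
      (pvYs sel dd) :=
    (PySem.List.sorted2_perm (pvTriples sel dd) (fun t => t.1) (fun t => t.2.1) false).trans
      (perm_pvTriples_pvYs sel dd)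
  have hkeyne : (pvYs sel dd).Pairwise (fun a b => pvKey a ≠ pvKey b) := by
    refine (pairwise_lex_pvYs sel dd).imp ?_
    intro a b h hk
    have h1 : a.1 = b.1 := congrArg (fun q => q.1) hk
    have h2 : a.2.1 = b.2.1 := congrArg (fun q => q.2) hk
    unfold pvLex at h
    omega
  have hkeyneS : (PySem.List.sorted2 (pvTriples sel dd) (fun t => t.1) (fun t => t.2.1)).Pairwise
      (fun a b => pvKey a ≠ pvKey b) :=
    (hperm.pairwise_iff (fun h => h.symm)).mpr hkeyne
  have hlexS : (PySem.List.sorted2 (pvTriples sel dd) (fun t => t.1) (fun t => t.2.1)).Pairwise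
      pvLex := by
    refine ((pvSorted2_pairwise (pvTriples sel dd)).and hkeyneS).imp ?_
    rintro a b ⟨hnb, hne⟩
    rw [pvBefore_false_iff] at hnb
    unfold pvLex
    rcases hnb with h | ⟨h1, h2⟩
    · exact Or.inl h
    · refine Or.inr ⟨h1, ?_⟩
      rcases lt_or_eq_of_le h2 with h3 | h3
      · exact h3
      · exact absurd (by unfold pvKey; rw [h1, h3]) hne
  exact List.Perm.eq_of_pairwise
    (fun a b _ _ hab hba => by unfold pvLex at hab hba; exfalso; omega)
    hlexS (pairwise_lex_pvYs sel dd) hperm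

-- ---- combination order ↔ index order ----

lemma pvOuts_eq (sel : List String) (dd : List (String × String)) :
    pvOuts sel dd = (pvYs sel dd).map (fun t => t.2.2) := by
  unfold pvOuts pvYs
  conv_lhs => rw [show sel = (PySem.List.enumerate sel 0).map (fun p => p.2)
    from (PySem.List.map_snd_enumerate sel 0).symm]
  rw [cjwcCombos2_map, List.filterMap_map, List.map_filterMap]
  congr 1
  funext p
  simp [Option.map_map, Function.comp_def]

lemma pvYs_nil_iff (sel : List String) (dd : List (String × String)) :
    pvYs sel dd = [] ↔ pvTriples sel dd = [] := by
  have h := perm_pvTriples_pvYs sel dd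
  constructor
  · intro he; rw [he] at h; exact h.eq_nil
  · intro he; rw [he] at h; exact (h.symm).eq_nil

-- ===== VERDICT (by name: the statement is the Claim_ definition above) =====
theorem create_json_with_combinations_spec : Claim_equal_create_json_with_combinations := by
  intro sel dd _
  unfold Spec_create_json_with_combinations
  rw [pvA_eq, pvAlt_eq, pvSorted2_eq, pvOuts_eq]
  refine Prod.ext rfl (Prod.ext rfl ?_)
  simp only [List.map_eq_nil_iff, List.isEmpty_iff, pvYs_nil_iff]
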